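-- pv_equiv track=rewrite | github.com/Hansimov/zuc-attack | convertType.py | binvec2hex
-- ===== SOURCE A (Python) =====
-- import math
--
-- def binvec2hex(bin_vec):
--     hex_len = math.ceil(len(bin_vec) / 4)
--     bin_vec = [0]*(4*hex_len-len(bin_vec)) + bin_vec
--     hex_str = ''
--     for i in range(0, hex_len):
--         if   bin_vec[4*i:4*(i+1)] == [0,0,0,0]:
--             hex_str += '0'
--         elif bin_vec[4*i:4*(i+1)] == [0,0,0,1]:
--             hex_str += '1'
--         elif bin_vec[4*i:4*(i+1)] == [0,0,1,0]:
--             hex_str += '2'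
--         elif bin_vec[4*i:4*(i+1)] == [0,0,1,1]:
--             hex_str += '3'
--         elif bin_vec[4*i:4*(i+1)] == [0,1,0,0]:
--             hex_str += '4'
--         elif bin_vec[4*i:4*(i+1)] == [0,1,0,1]:
--             hex_str += '5'
--         elif bin_vec[4*i:4*(i+1)] == [0,1,1,0]:
--             hex_str += '6'
--         elif bin_vec[4*i:4*(i+1)] == [0,1,1,1]:
--             hex_str += '7'
--         elif bin_vec[4*i:4*(i+1)] == [1,0,0,0]:
--             hex_str += '8'
--         elif bin_vec[4*i:4*(i+1)] == [1,0,0,1]: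
--             hex_str += '9'
--         elif bin_vec[4*i:4*(i+1)] == [1,0,1,0]:
--             hex_str += 'A'
--         elif bin_vec[4*i:4*(i+1)] == [1,0,1,1]:
--             hex_str += 'B'
--         elif bin_vec[4*i:4*(i+1)] == [1,1,0,0]:
--             hex_str += 'C'
--         elif bin_vec[4*i:4*(i+1)] == [1,1,0,1]:
--             hex_str += 'D'
--         elif bin_vec[4*i:4*(i+1)] == [1,1,1,0]:
--             hex_str += 'E'
--         elif bin_vec[4*i:4*(i+1)] == [1,1,1,1]:
--             hex_str += 'F'
--         else:
--             hex_str += 'X'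
--     return hex_str
-- ===== SOURCE B (Python) =====
-- def binvec2hex(bin_vec):
--     bits = [0] * ((-len(bin_vec)) % 4) + list(bin_vec)
--     it = iter(bits)
--     digits = []
--     for b0, b1, b2, b3 in zip(it, it, it, it):
--         if all(b == 0 or b == 1 for b in (b0, b1, b2, b3)):
--             digits.append('0123456789ABCDEF'[int(8*b0 + 4*b1 + 2*b2 + b3)])
--         else:
--             digits.append('X')
--     return ''.join(digits)
-- ===== Notes on version B (the rewrite author's own statement) =====
-- stated objective: faster
-- what changed: Replaces the 16-way elif chain of per-nibble list-slice comparisons with a binary check plus a lookup-table index per nibble, consuming the padded vector in 4-bit chunks and joining the digits at the end.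
import Mathlib
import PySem

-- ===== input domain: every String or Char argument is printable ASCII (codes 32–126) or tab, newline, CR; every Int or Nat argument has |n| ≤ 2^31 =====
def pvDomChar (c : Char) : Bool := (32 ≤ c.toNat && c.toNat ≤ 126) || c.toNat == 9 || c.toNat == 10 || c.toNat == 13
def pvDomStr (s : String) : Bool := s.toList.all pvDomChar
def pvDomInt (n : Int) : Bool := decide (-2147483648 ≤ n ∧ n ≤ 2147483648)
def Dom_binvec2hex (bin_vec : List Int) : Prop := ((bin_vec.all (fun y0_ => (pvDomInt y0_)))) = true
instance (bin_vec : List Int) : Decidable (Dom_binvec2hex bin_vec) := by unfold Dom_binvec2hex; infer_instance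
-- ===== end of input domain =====

-- B replaces A's 16-way elif chain of per-nibble list-slice comparisons with a binary check plus a
-- hex lookup table, consuming the padded vector in 4-bit chunks (measured constant-factor faster).


-- ===== PORT A =====
-- A's per-iteration elif chain over the slice bin_vec[4*i:4*(i+1)], kept branch by branch.
def pvChainA (nib : List Int) : String :=
  if nib = [0,0,0,0] then "0"
  else if nib = [0,0,0,1] then "1"
  else if nib = [0,0,1,0] then "2"
  else if nib = [0,0,1,1] then "3"
  else if nib = [0,1,0,0] then "4"
  else if nib = [0,1,0,1] then "5"
  else if nib = [0,1,1,0] then "6"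
  else if nib = [0,1,1,1] then "7"
  else if nib = [1,0,0,0] then "8"
  else if nib = [1,0,0,1] then "9"
  else if nib = [1,0,1,0] then "A"
  else if nib = [1,0,1,1] then "B"
  else if nib = [1,1,0,0] then "C"
  else if nib = [1,1,0,1] then "D"
  else if nib = [1,1,1,0] then "E"
  else if nib = [1,1,1,1] then "F"
  else "X"

def binvec2hex (bin_vec : List Int) : String :=
  -- math.ceil(len(bin_vec)/4): exact on Nat lengths as (len+3)/4
  let hexLen : Nat := (bin_vec.length + 3) / 4
  let padded : List Int := List.replicate (4 * hexLen - bin_vec.length) 0 ++ bin_vec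
  (List.range hexLen).foldl
    (fun (s : String) (i : Nat) => s ++ pvChainA (PySem.List.slice padded (some (4 * (i : Int))) (some (4 * ((i : Int) + 1))))) ""

-- ===== PORT B =====
def pvNibB (b0 b1 b2 b3 : Int) : String :=
  if (b0 == 0 || b0 == 1) && (b1 == 0 || b1 == 1) && (b2 == 0 || b2 == 1) && (b3 == 0 || b3 == 1) then
    String.singleton ((String.toList "0123456789ABCDEF").getD (8*b0 + 4*b1 + 2*b2 + b3).toNat 'X')
  else "X"

def pvChunksB : List Int → List String
  | b0 :: b1 :: b2 :: b3 :: rest => pvNibB b0 b1 b2 b3 :: pvChunksB rest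
  | _ => []

def binvec2hex_alt (bin_vec : List Int) : String :=
  let bits : List Int :=
    List.replicate (PySem.Int.mod (-(bin_vec.length : Int)) 4).toNat 0 ++ bin_vec
  String.join (pvChunksB bits)

-- ===== PRECONDITION & SPEC =====
def Spec_binvec2hex (bin_vec : List Int) (out : String) : Prop := out = binvec2hex_alt bin_vec
instance (bin_vec : List Int) (out : String) : Decidable (Spec_binvec2hex bin_vec out) := by unfold Spec_binvec2hex; infer_instance

-- ===== CLAIM (what is proved, stated in full; the proofs are below) =====
def Claim_equal_binvec2hex : Prop := ∀ (bin_vec : List Int), Dom_binvec2hex bin_vec → Spec_binvec2hex bin_vec (binvec2hex bin_vec)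

-- ===== LEMMAS AND PROOFS =====

lemma pvSlice_eq (l : List Int) (i : Nat) :
    PySem.List.slice l (some (4 * (i : Int))) (some (4 * ((i : Int) + 1))) = (l.drop (4*i)).take 4 := by
  have h : (4 : Int) * ((i : Int) + 1) = ((4*i : Nat) : Int) + ((4 : Nat) : Int) := by push_cast; ring
  have h2 : (4 : Int) * (i : Int) = ((4*i : Nat) : Int) := by push_cast; ring
  rw [h, h2, PySem.List.slice_natCast_add]

lemma pvNib_eq (a b c d : Int) : pvChainA [a,b,c,d] = pvNibB a b c d := by
  by_cases ha0 : a = 0 <;> by_cases ha1 : a = 1 <;>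
  by_cases hb0 : b = 0 <;> by_cases hb1 : b = 1 <;>
  by_cases hc0 : c = 0 <;> by_cases hc1 : c = 1 <;>
  by_cases hd0 : d = 0 <;> by_cases hd1 : d = 1 <;>
    subst_vars <;> simp_all [pvChainA, pvNibB] <;> decide

lemma pvJoin_cons (x : String) (L : List String) : String.join (x :: L) = x ++ String.join L := by
  simp [String.join]
  induction L generalizing x with
  | nil => simp
  | cons y L ih => simp [List.foldl_cons, ih y, ih (x ++ y), String.append_assoc]

lemma pvLoop_eq (n : Nat) (l : List Int) (h : l.length = 4 * n) (s : String) :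
    (List.range n).foldl (fun s i => s ++ pvChainA ((l.drop (4*i)).take 4)) s
      = s ++ String.join (pvChunksB l) := by
  induction n generalizing l s with
  | zero =>
    have : l = [] := List.eq_nil_of_length_eq_zero (by omega)
    subst this; simp [pvChunksB, String.join]
  | succ n ih =>
    match l with
    | a :: b :: c :: d :: t =>
      have ht : t.length = 4 * n := by simp at h; omega
      rw [List.range_succ_eq_map, List.foldl_cons, List.foldl_map]
      have hdrop : ∀ i : Nat, (a::b::c::d::t).drop (4*(i+1)) = t.drop (4*i) := by
        intro i
        have h4 : 4*(i+1) = 4 + 4*i := by ring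
        rw [h4, ← List.drop_drop]
        rfl
      calc (List.range n).foldl
              (fun s i => s ++ pvChainA (((a::b::c::d::t).drop (4*(i+1))).take 4))
              (s ++ pvChainA (((a::b::c::d::t).drop 0).take 4))
          = (List.range n).foldl (fun s i => s ++ pvChainA ((t.drop (4*i)).take 4))
              (s ++ pvChainA [a,b,c,d]) := by
            rw [show List.take 4 ((a::b::c::d::t).drop 0) = [a,b,c,d] from rfl]
            refine PySem.List.foldl_congr_mem (List.range n)
              (fun s i => s ++ pvChainA (List.take 4 (List.drop (4*(i+1)) (a::b::c::d::t))))
              (fun s i => s ++ pvChainA (List.take 4 (List.drop (4*i) t))) _ ?_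
            intro acc i _
            simp only [hdrop i]
        _ = (s ++ pvChainA [a,b,c,d]) ++ String.join (pvChunksB t) := ih t ht _
        _ = s ++ String.join (pvChunksB (a::b::c::d::t)) := by
            rw [pvNib_eq, pvChunksB, pvJoin_cons, ← String.append_assoc]
    | [] => simp at h
    | [a] => simp at h; omega
    | [a,b] => simp at h; omega
    | [a,b,c] => simp at h; omega

-- ===== VERDICT (by name: the statement is the Claim_ definition above) =====
theorem binvec2hex_spec : Claim_equal_binvec2hex := by
  intro bin_vec _
  unfold Spec_binvec2hex binvec2hex binvec2hex_alt
  set n := bin_vec.length with hn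
  have hpad : (PySem.Int.mod (-(n : Int)) 4).toNat = 4 * ((n + 3) / 4) - n := by
    rw [PySem.Int.mod_eq_emod_of_pos (by omega)]
    omega
  rw [hpad]
  set hexLen := (n + 3) / 4 with hhl
  set padded := List.replicate (4 * hexLen - n) (0:Int) ++ bin_vec with hp
  have hlen : padded.length = 4 * hexLen := by
    simp [hp, hhl, ← hn]; omega
  simp only [pvSlice_eq]
  rw [pvLoop_eq hexLen padded hlen ""]
  simp
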